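-- pv_equiv track=rewrite | github.com/GayanRuchiranga/ChemGuide | Chem_Guide_BackEnd/identify_molecule.py | alkyne
-- ===== SOURCE A (Python) =====
-- def alkyne(input):
--     carbon = 0
--     hydrogen = 0
--     alkyne_val = 0
--
--     for i in input:
--         if i == "C" or i == "c":
--             carbon += 1
--         elif i == "H" or i == "h":
--             hydrogen += 1
--         elif i.isdigit():
--             hydrogen += int(i)-1
--         else:
--             alkyne_val = 1
--
--     if(input == "CHCH"):
--         return "0"
--     elif alkyne_val != 1 and hydrogen == ((carbon * 2)-2):
--         return "0"
--     else:
--         return "1"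
-- ===== SOURCE B (Python) =====
-- def alkyne(input):
--     if input == "CHCH":
--         return "0"
--     freq = {}
--     for ch in input:
--         freq[ch] = freq.get(ch, 0) + 1
--     if any(k not in "CcHh0123456789" for k in freq):
--         return "1"
--     carbon = freq.get("C", 0) + freq.get("c", 0)
--     hydrogen = (freq.get("H", 0) + freq.get("h", 0)
--                 + sum(freq.get(d, 0) * (int(d) - 1) for d in "0123456789"))
--     return "0" if hydrogen == 2 * carbon - 2 else "1"
-- ===== Notes on version B (the rewrite author's own statement) =====
-- stated objective: alternative
-- what changed: Replaces A's single loop accumulating three counters (carbon, hydrogen, validity flag) by a frequency table (Counter dict) built once; validity becomes a check over the table's keys and the carbon/hydrogen tallies are read back from the table over the fixed alphabet CcHh0123456789 instead of rescanning the input.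
import Mathlib
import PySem

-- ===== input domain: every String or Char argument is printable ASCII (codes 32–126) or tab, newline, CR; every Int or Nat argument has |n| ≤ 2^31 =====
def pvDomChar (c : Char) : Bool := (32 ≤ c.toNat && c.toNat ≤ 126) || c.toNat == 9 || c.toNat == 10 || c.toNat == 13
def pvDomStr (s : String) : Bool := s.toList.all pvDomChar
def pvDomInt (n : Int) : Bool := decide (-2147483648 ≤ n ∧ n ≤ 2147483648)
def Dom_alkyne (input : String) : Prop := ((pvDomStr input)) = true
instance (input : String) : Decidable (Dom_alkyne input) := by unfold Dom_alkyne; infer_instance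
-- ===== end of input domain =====

-- B replaces A's single accumulating three-counter loop by a frequency table (Counter) built
-- once, after which the decision reads the table over the fixed 14-character alphabet instead
-- of rescanning the input; objective: alternative data structure, same values.

-- ===== PORT A =====
-- one pass over the characters, accumulating (carbon, hydrogen, alkyne_val)
def alkyneLoop (cs : List Char) (st : Int × Int × Int) : Int × Int × Int :=
  cs.foldl (fun (st : Int × Int × Int) i =>
    let (carbon, hydrogen, av) := st
    if i = 'C' ∨ i = 'c' then (carbon + 1, hydrogen, av)
    else if i = 'H' ∨ i = 'h' then (carbon, hydrogen + 1, av)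
    else if i.isDigit then (carbon, hydrogen + ((i.toNat : Int) - 48) - 1, av)
    else (carbon, hydrogen, 1)) st

def alkyne (input : String) : String :=
  let st := alkyneLoop input.toList (0, 0, 0)
  if input = "CHCH" then "0"
  else if st.2.2 ≠ 1 ∧ st.2.1 = st.1 * 2 - 2 then "0"
  else "1"

-- ===== PORT B =====
-- frequency dict built by 'freq[ch] = freq.get(ch, 0) + 1'; then key-validity check over the
-- dict's keys and counts read back from the table, with the digit sum over the fixed "0123456789"
def alkyne_alt (input : String) : String :=
  if input = "CHCH" then "0"
  else
    let freq : PySem.Dict Char Int :=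
      input.toList.foldl (fun d x => d.modify x 0 (· + 1)) PySem.Dict.empty
    if freq.keys.any (fun k => !("CcHh0123456789".toList.contains k)) then "1"
    else
      let carbon : Int := freq.getD 'C' 0 + freq.getD 'c' 0
      let hydrogen : Int := freq.getD 'H' 0 + freq.getD 'h' 0
        + (("0123456789".toList).map (fun d => freq.getD d 0 * (((d.toNat : Int) - 48) - 1))).sum
      if hydrogen = 2 * carbon - 2 then "0" else "1"

-- ===== PRECONDITION & SPEC =====
def Spec_alkyne (input : String) (out : String) : Prop := out = alkyne_alt input
instance (input : String) (out : String) : Decidable (Spec_alkyne input out) := by unfold Spec_alkyne; infer_instance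

-- ===== CLAIM =====
def Claim_equal_alkyne : Prop := ∀ (input : String), Dom_alkyne input → Spec_alkyne input (alkyne input)

-- ===== LEMMAS AND PROOFS =====

def allowedL : List Char := ['C','c','H','h','0','1','2','3','4','5','6','7','8','9']
def digitsL : List Char := ['0','1','2','3','4','5','6','7','8','9']

theorem allowed_eq : "CcHh0123456789".toList = allowedL := by decide
theorem digits_eq : "0123456789".toList = digitsL := by decide

def carbonOf (cs : List Char) : Int := (cs.count 'C' : Int) + (cs.count 'c' : Int)
def hydroOf (cs : List Char) : Int := (cs.count 'H' : Int) + (cs.count 'h' : Int)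
  + ((cs.filter Char.isDigit).map (fun c => ((c.toNat : Int) - 48) - 1)).sum
def validOf (cs : List Char) : Bool := cs.all (fun c => allowedL.contains c)

theorem mem_digits_of_isDigit (c : Char) (h : c.isDigit = true) : c ∈ digitsL := by
  simp [Char.isDigit, UInt32.le_iff_toNat_le] at h
  obtain ⟨h1, h2⟩ := h
  have hofnat : c = Char.ofNat c.toNat := by simp [Char.ofNat_toNat]
  have h1' : 48 ≤ c.toNat := h1
  have h2' : c.toNat ≤ 57 := h2
  interval_cases hn : c.toNat <;> simp only [hofnat] <;> decide

theorem isDigit_of_mem_digits (c : Char) (h : c ∈ digitsL) : c.isDigit = true := by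
  fin_cases h <;> decide

theorem mem_allowed_of_mem_digits (c : Char) (h : c ∈ digitsL) : c ∈ allowedL := by
  fin_cases h <;> decide

theorem validOf_cons (c : Char) (cs : List Char) :
    validOf (c :: cs) = (allowedL.contains c && validOf cs) := by
  simp [validOf]

theorem carbonOf_cons (c : Char) (cs : List Char) :
    carbonOf (c :: cs) = carbonOf cs + (if c = 'C' ∨ c = 'c' then 1 else 0) := by
  simp only [carbonOf, List.count_cons]
  by_cases h1 : c = 'C' <;> by_cases h2 : c = 'c' <;> simp_all <;> ring

theorem hydroOf_cons (c : Char) (cs : List Char) :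
    hydroOf (c :: cs) = hydroOf cs
      + (if c = 'H' ∨ c = 'h' then 1
         else if c.isDigit then ((c.toNat : Int) - 48) - 1 else 0) := by
  simp only [hydroOf, List.count_cons, List.filter_cons]
  by_cases h1 : c = 'H' <;> by_cases h2 : c = 'h' <;> by_cases hd : c.isDigit <;>
    simp_all <;> ring

-- A's loop computes exactly (carbon count, hydrogen tally, validity flag)
theorem alkyneLoop_eq (cs : List Char) (c0 h0 a0 : Int) :
    alkyneLoop cs (c0, h0, a0)
      = (c0 + carbonOf cs, h0 + hydroOf cs, if validOf cs then a0 else 1) := by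
  induction cs generalizing c0 h0 a0 with
  | nil => simp [alkyneLoop, carbonOf, hydroOf, validOf]
  | cons c cs ih =>
    simp only [alkyneLoop, List.foldl_cons] at *
    rw [carbonOf_cons, hydroOf_cons, validOf_cons]
    by_cases hC : c = 'C' ∨ c = 'c'
    · have hm : allowedL.contains c = true := by
        rcases hC with h | h <;> subst h <;> decide
      have hC' : ¬ (c = 'H' ∨ c = 'h') := by
        rcases hC with h | h <;> subst h <;> decide
      have hCd : c.isDigit = false := by
        rcases hC with h | h <;> subst h <;> decide
      simp only [if_pos hC, ih, hm, Bool.true_and]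
      simp [hC', hCd]
      ring
    · by_cases hH : c = 'H' ∨ c = 'h'
      · have hm : allowedL.contains c = true := by
          rcases hH with h | h <;> subst h <;> decide
        simp only [if_neg hC, if_pos hH, ih, hm, Bool.true_and]
        simp
        ring
      · by_cases hd : c.isDigit
        · have hm : allowedL.contains c = true := by
            have := mem_allowed_of_mem_digits c (mem_digits_of_isDigit c hd)
            simpa using this
          simp only [if_neg hC, if_neg hH, if_pos hd, ih, hm, Bool.true_and]
          simp
          ring
        · have hm : allowedL.contains c = false := by
            push Not at hC hH
            simp only [List.contains_eq_mem, decide_eq_false_iff_not]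
            intro hmem
            fin_cases hmem <;> simp_all
          simp only [if_neg hC, if_neg hH, if_neg hd, ih, hm, Bool.false_and,
            Bool.false_eq_true]
          simp

-- the per-digit-symbol sum over the frequency table equals A's per-character digit tally
theorem sum_count_mul_eq_filter_sum (cs : List Char) :
    ((digitsL).map (fun d => (cs.count d : Int) * (((d.toNat : Int) - 48) - 1))).sum
      = ((cs.filter Char.isDigit).map (fun c => ((c.toNat : Int) - 48) - 1)).sum := by
  induction cs with
  | nil => simp [digitsL]
  | cons c cs ih =>
    by_cases hd : c.isDigit
    · have hmem := mem_digits_of_isDigit c hd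
      rw [List.filter_cons_of_pos hd]
      simp only [List.map_cons, List.sum_cons, ← ih]
      fin_cases hmem <;> simp [digitsL, List.count_cons] <;> ring
    · rw [List.filter_cons_of_neg hd, ← ih]
      congr 1
      apply List.map_congr_left
      intro d hdm
      have : ¬ (c = d) := fun h => hd (h ▸ isDigit_of_mem_digits d hdm)
      simp [this]

theorem getD_freq (cs : List Char) (c : Char) :
    (cs.foldl (fun d x => d.modify x 0 (· + 1)) (PySem.Dict.empty : PySem.Dict Char Int)).getD c 0
      = (cs.count c : Int) := by
  rw [PySem.Dict.getD_foldl_modify_add_one]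
  simp

-- the key-validity test over the frequency table equals the negation of A's validity flag
theorem keys_freq_invalid (cs : List Char) :
    ((cs.foldl (fun d x => d.modify x 0 (· + 1)) (PySem.Dict.empty : PySem.Dict Char Int)).keys.any
        (fun k => !("CcHh0123456789".toList.contains k)))
      = !(validOf cs) := by
  rw [PySem.Dict.keys_foldl_modify, allowed_eq]
  simp only [PySem.Dict.keys_empty, validOf]
  cases hv : cs.all (fun c => allowedL.contains c) with
  | true =>
    simp only [List.all_eq_true] at hv
    simp only [Bool.not_true, List.any_eq_false]
    intro k hk
    have hkcs : k ∈ cs := by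
      have := (PySem.Set.mem_update ([] : PySem.Set Char) cs k).mp hk
      simpa using this
    have := hv k hkcs
    simpa using this
  | false =>
    simp only [List.all_eq_false] at hv
    obtain ⟨k, hk, hkv⟩ := hv
    simp only [Bool.not_false, List.any_eq_true]
    refine ⟨k, ?_, by simp_all⟩
    exact (PySem.Set.mem_update ([] : PySem.Set Char) cs k).mpr (Or.inr hk)

-- ===== VERDICT =====
theorem alkyne_spec : Claim_equal_alkyne := by
  intro input _
  unfold Spec_alkyne alkyne alkyne_alt
  by_cases hEq : input = "CHCH"
  · simp [hEq]
  · simp only [hEq, if_false]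
    rw [alkyneLoop_eq]
    simp only [keys_freq_invalid, getD_freq, digits_eq]
    cases hv : validOf input.toList with
    | true =>
      simp only [Bool.not_true, Bool.false_eq_true, if_false]
      rw [sum_count_mul_eq_filter_sum]
      simp only [carbonOf, hydroOf, ne_eq]
      split_ifs with h1 h2 h2 <;> first
        | rfl
        | (exfalso; omega)
    | false =>
      simp
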